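-- pv_equiv track=rewrite | github.com/nealcaren/florida-sociology | scripts/aligner.py | _tokenize_with_breaks
-- ===== SOURCE A (Python) =====
-- def _tokenize_with_breaks(paragraphs: list[str]) -> tuple[list[str], set[int]]:
--     """Tokenize paragraphs into words, tracking paragraph break positions.
--
--     Returns (words, break_positions) where break_positions is the set of
--     word indices where a new paragraph starts.
--     """
--     words = []
--     breaks = set()
--     for para in paragraphs:
--         if words:
--             breaks.add(len(words))
--         words.extend(para.split())
--     return words, breaks
-- ===== SOURCE B (Python) =====
-- def _tokenize_with_breaks(paragraphs: list[str]) -> tuple[list[str], set[int]]: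
--     """Tokenize paragraphs into words, tracking paragraph break positions."""
--     token_lists = [p.split() for p in paragraphs]
--     words = [w for toks in token_lists for w in toks]
--     starts = []
--     total = 0
--     for toks in token_lists:
--         starts.append(total)
--         total += len(toks)
--     breaks = {s for s in starts if s > 0}
--     return words, breaks
-- ===== Notes on version B (the rewrite author's own statement) =====
-- stated objective: alternative
-- what changed: Replaces the single stateful loop that conditionally records len(words) before each extend by a three-stage pipeline: split every paragraph once, flatten the token lists into words, and derive the break set from the running prefix sums of per-paragraph token counts filtered to be positive.
import Mathlib
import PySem

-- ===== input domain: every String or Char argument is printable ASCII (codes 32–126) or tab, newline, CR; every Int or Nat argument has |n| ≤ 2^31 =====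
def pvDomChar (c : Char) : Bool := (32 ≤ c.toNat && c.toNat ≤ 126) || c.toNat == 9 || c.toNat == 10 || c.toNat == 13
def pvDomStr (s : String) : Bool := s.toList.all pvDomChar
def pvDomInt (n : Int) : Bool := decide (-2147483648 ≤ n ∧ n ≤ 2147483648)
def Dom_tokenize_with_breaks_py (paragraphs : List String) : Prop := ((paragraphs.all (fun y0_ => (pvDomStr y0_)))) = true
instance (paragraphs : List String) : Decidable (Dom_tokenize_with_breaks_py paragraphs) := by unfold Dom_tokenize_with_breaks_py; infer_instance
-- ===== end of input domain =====

-- B re-derives the break set from prefix sums of per-paragraph token counts instead of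
-- conditionally recording len(words) inside the accumulating loop (alternative decomposition, same cost).

-- ===== PORT A =====
def tokenize_with_breaks_py (paragraphs : List String) : List String × List Int :=
  paragraphs.foldl
    (fun (st : List String × PySem.Set Int) para =>
      let breaks := if st.1.isEmpty then st.2 else PySem.Set.add st.2 (st.1.length : Int)
      (st.1 ++ PySem.Str.split₀ para, breaks))
    ([], PySem.Set.empty)

-- ===== PORT B =====
def tokenize_with_breaks_py_alt (paragraphs : List String) : List String × List Int :=
  let token_lists := paragraphs.map PySem.Str.split₀
  let words := token_lists.flatMap (fun toks => toks)
  let st := token_lists.foldl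
    (fun (st : List Int × Int) toks => (st.1 ++ [st.2], st.2 + (toks.length : Int))) ([], 0)
  let breaks := PySem.Set.ofList (st.1.filter (fun s => 0 < s))
  (words, breaks)

-- ===== PRECONDITION & SPEC =====
def Spec_tokenize_with_breaks_py (paragraphs : List String) (out : List String × List Int) : Prop := out = tokenize_with_breaks_py_alt paragraphs
instance (paragraphs : List String) (out : List String × List Int) : Decidable (Spec_tokenize_with_breaks_py paragraphs out) := by unfold Spec_tokenize_with_breaks_py; infer_instance

-- ===== CLAIM (what is proved, stated in full; the proofs are below) =====
def Claim_equal_tokenize_with_breaks_py : Prop := ∀ (paragraphs : List String), Dom_tokenize_with_breaks_py paragraphs → Spec_tokenize_with_breaks_py paragraphs (tokenize_with_breaks_py paragraphs)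

-- ===== LEMMAS AND PROOFS =====

-- word index at which each paragraph's tokens start, given the running count n
def pvStarts (n : Int) : List (List String) → List Int
  | [] => []
  | t :: ts => n :: pvStarts (n + (t.length : Int)) ts

theorem pvA_fold (ts : List (List String)) :
    ∀ (ws : List String) (bs : PySem.Set Int),
    List.foldl (fun (st : List String × PySem.Set Int) toks =>
        (st.1 ++ toks, if st.1.isEmpty then st.2 else PySem.Set.add st.2 (st.1.length : Int))) (ws, bs) ts
      = (ws ++ ts.flatMap (fun toks => toks),
         List.foldl PySem.Set.add bs ((pvStarts (ws.length : Int) ts).filter (fun s => decide (0 < s)))) := by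
  induction ts with
  | nil => intro ws bs; simp [pvStarts]
  | cons t ts ih =>
    intro ws bs
    simp only [List.foldl_cons, ih, pvStarts, List.filter_cons]
    by_cases h : ws = []
    · subst h; simp
    · have hne : ws.isEmpty = false := by simp [h]
      have hlen : 0 < ws.length := List.length_pos_iff.mpr h
      simp [hne, hlen, List.length_append]

theorem pvB_fold (ts : List (List String)) :
    ∀ (acc : List Int) (n : Int),
    (List.foldl (fun (st : List Int × Int) toks => (st.1 ++ [st.2], st.2 + (toks.length : Int))) (acc, n) ts).1
      = acc ++ pvStarts n ts := by
  induction ts with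
  | nil => intro acc n; simp [pvStarts]
  | cons t ts ih =>
    intro acc n
    simp only [List.foldl_cons, ih, pvStarts]
    simp

-- ===== VERDICT (by name: the statement is the Claim_ definition above) =====
theorem tokenize_with_breaks_py_spec : Claim_equal_tokenize_with_breaks_py := by
  intro paragraphs _
  unfold Spec_tokenize_with_breaks_py tokenize_with_breaks_py tokenize_with_breaks_py_alt
  rw [show paragraphs = paragraphs from rfl, ← List.foldl_map (f := PySem.Str.split₀)
      (g := fun (st : List String × PySem.Set Int) toks =>
        (st.1 ++ toks, if st.1.isEmpty then st.2 else PySem.Set.add st.2 (st.1.length : Int)))]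
  rw [pvA_fold]
  simp only [pvB_fold, PySem.Set.ofList_eq_foldl, PySem.Set.empty, List.nil_append,
    List.length_nil, Nat.cast_zero]
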